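-- pv_equiv track=rewrite | github.com/insiyapithapur/NaharOm-STP | UserFeatures/models.py | increment_prefix
-- ===== SOURCE A (Python) =====
-- def increment_prefix(prefix):
--     """
--     Increment the alphabetic prefix, cycling through letters like 'IA', 'IB', ..., 'IZ', 'JA', etc.
--     """
--     if not prefix:
--         return "AA"
--
--     prefix_chars = list(prefix)
--
--     for i in reversed(range(len(prefix_chars))):
--         if prefix_chars[i] != "Z":
--             prefix_chars[i] = chr(ord(prefix_chars[i]) + 1)
--             break
--         else:
--             prefix_chars[i] = "A"
--     return "".join(prefix_chars)
-- ===== SOURCE B (Python) =====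
-- def increment_prefix(prefix):
--     if not prefix:
--         return "AA"
--     stripped = prefix.rstrip("Z")
--     if not stripped:
--         return "A" * len(prefix)
--     return stripped[:-1] + chr(ord(stripped[-1]) + 1) + "A" * (len(prefix) - len(stripped))
-- ===== Notes on version B (the rewrite author's own statement) =====
-- stated objective: simpler
-- what changed: Replaces the reversed per-character carry loop with mutation by one rstrip locating the trailing run of Z characters, then builds the result by slicing: the kept head, the incremented last kept character, and an A-fill of the stripped length.
import Mathlib
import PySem

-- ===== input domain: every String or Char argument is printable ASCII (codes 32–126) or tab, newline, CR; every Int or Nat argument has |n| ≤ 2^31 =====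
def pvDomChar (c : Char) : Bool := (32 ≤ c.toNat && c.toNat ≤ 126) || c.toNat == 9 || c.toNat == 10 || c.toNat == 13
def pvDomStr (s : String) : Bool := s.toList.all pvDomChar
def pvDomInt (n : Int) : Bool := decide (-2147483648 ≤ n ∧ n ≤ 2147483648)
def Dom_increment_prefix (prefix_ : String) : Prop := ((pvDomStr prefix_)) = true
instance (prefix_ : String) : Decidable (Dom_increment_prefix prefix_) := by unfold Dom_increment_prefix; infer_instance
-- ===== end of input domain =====

-- B replaces A's reversed carry loop with one rstrip('Z') plus slicing; objective: simpler.

-- ===== PORT A =====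
-- the for-loop over reversed indices with in-place mutation and break:
-- walking the reversed char list, turning 'Z' into 'A' until the first non-'Z',
-- which is incremented, stopping there (the untouched tail is kept as-is).
def incRevA : List Char → List Char
  | [] => []
  | c :: rest =>
      if c ≠ 'Z' then Char.ofNat (c.toNat + 1) :: rest
      else 'A' :: incRevA rest

def increment_prefix (prefix_ : String) : String :=
  if prefix_.toList = [] then "AA"
  else String.ofList ((incRevA prefix_.toList.reverse).reverse)

-- ===== PORT B =====
-- rstrip("Z") is ported by hand (exact): drop the trailing run of 'Z' characters.
-- 'stripped[-1]' is the head and 'stripped[:-1]' the reversed tail of the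
-- reverse-then-dropWhile form of the strip.
def increment_prefix_alt (prefix_ : String) : String :=
  let l := prefix_.toList
  if l = [] then "AA"
  else
    match l.reverse.dropWhile (fun c => c == 'Z') with
    | [] => String.ofList (List.replicate l.length 'A')            -- input was all 'Z'
    | c :: t =>                                                 -- stripped = (c :: t).reverse
        String.ofList (t.reverse ++ Char.ofNat (c.toNat + 1) :: List.replicate (l.length - (t.length + 1)) 'A')

-- ===== PRECONDITION & SPEC =====
def Spec_increment_prefix (prefix_ : String) (out : String) : Prop := out = increment_prefix_alt prefix_
instance (prefix_ : String) (out : String) : Decidable (Spec_increment_prefix prefix_ out) := by unfold Spec_increment_prefix; infer_instance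

-- ===== CLAIM (what is proved, stated in full; the proofs are below) =====
def Claim_equal_increment_prefix : Prop := ∀ (prefix_ : String), Dom_increment_prefix prefix_ → Spec_increment_prefix prefix_ (increment_prefix prefix_)

-- ===== LEMMAS AND PROOFS =====

-- first element incremented (if any), rest kept
def inc1 : List Char → List Char
  | [] => []
  | c :: t => Char.ofNat (c.toNat + 1) :: t

-- A's loop over the reversed list = leading-'Z' run replaced by 'A's, first non-'Z' incremented
theorem incRevA_eq (r : List Char) :
    incRevA r = List.replicate (r.length - (r.dropWhile (fun c => c == 'Z')).length) 'A'
      ++ inc1 (r.dropWhile (fun c => c == 'Z')) := by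
  induction r with
  | nil => simp [incRevA, inc1]
  | cons c rest ih =>
    by_cases h : c = 'Z'
    · subst h
      have hle : (rest.dropWhile (fun c => c == 'Z')).length ≤ rest.length :=
        List.length_dropWhile_le _ _
      simp only [incRevA, List.dropWhile_cons, ih, List.length_cons]
      rw [if_neg (show ¬('Z' ≠ 'Z') by decide), if_pos (show (('Z':Char) == 'Z') = true by decide)]
      have h2 : rest.length + 1 - (rest.dropWhile (fun c => c == 'Z')).length
          = (rest.length - (rest.dropWhile (fun c => c == 'Z')).length) + 1 := by omega
      simp [h2, List.replicate_succ]
    · simp [incRevA, h, inc1]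

theorem increment_prefix_spec : Claim_equal_increment_prefix := by
  intro p _
  unfold Spec_increment_prefix increment_prefix increment_prefix_alt
  by_cases hnil : p.toList = []
  · simp [hnil]
  · simp only [hnil, if_false]
    rcases hd : p.toList.reverse.dropWhile (fun c => c == 'Z') with _ | ⟨c, t⟩
    · rw [incRevA_eq, hd]
      simp [inc1, List.reverse_replicate]
    · rw [incRevA_eq, hd]
      simp [inc1, List.reverse_replicate]
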